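-- pv_equiv track=rewrite | github.com/mikeg0321/Reytech-RFQ | src/api/modules/routes_outreach_next.py | _rebid_urgency
-- ===== SOURCE A (Python) =====
-- def _rebid_urgency(expiring_contracts):
--     """Points to add to the prospect's base score based on contract timing.
--
--     Curve flipped per 2026-04-24 product-engineer review: the 61-90d window
--     is highest leverage (time to get onto the RFQ distribution list before
--     the successor solicitation posts). <30d is mostly too late to onboard a
--     new bidder; the right action there is a rebid memo, not a registration.
--
--       61-90d  → +30 (peak — register NOW if not already)
--       31-60d  → +25 (rebid memo window open)
--       91-120d → +15 (early awareness)
--       0-30d   → +10 (late — memo-only, often already too late)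
--       award-gap (days<0): no boost (diagnostic, not an urgency)
--       Reytech-as-incumbent: no boost (RENEWAL, different card treatment)
--     """
--     urgency = 0
--     for c in expiring_contracts:
--         if c["is_reytech"] or c["is_award_gap"]:
--             continue
--         d = c["days_until_expiry"]
--         if 61 <= d <= 90:     urgency = max(urgency, 30)
--         elif 31 <= d <= 60:   urgency = max(urgency, 25)
--         elif 91 <= d <= 120:  urgency = max(urgency, 15)
--         elif 0 <= d <= 30:    urgency = max(urgency, 10)
--     return urgency
-- ===== SOURCE B (Python) =====
-- def _rebid_urgency(expiring_contracts):
--     days = [c["days_until_expiry"] for c in expiring_contracts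
--             if not (c["is_reytech"] or c["is_award_gap"])]
--     if any(61 <= d <= 90 for d in days):
--         return 30
--     if any(31 <= d <= 60 for d in days):
--         return 25
--     if any(91 <= d <= 120 for d in days):
--         return 15
--     if any(0 <= d <= 30 for d in days):
--         return 10
--     return 0
-- ===== Notes on version B (the rewrite author's own statement) =====
-- stated objective: alternative
-- what changed: Replaces the per-contract running-max fold with a collect-then-probe: first build the list of eligible expiry days, then test the four point windows in descending point order and return the first that contains some day.
import Mathlib
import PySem

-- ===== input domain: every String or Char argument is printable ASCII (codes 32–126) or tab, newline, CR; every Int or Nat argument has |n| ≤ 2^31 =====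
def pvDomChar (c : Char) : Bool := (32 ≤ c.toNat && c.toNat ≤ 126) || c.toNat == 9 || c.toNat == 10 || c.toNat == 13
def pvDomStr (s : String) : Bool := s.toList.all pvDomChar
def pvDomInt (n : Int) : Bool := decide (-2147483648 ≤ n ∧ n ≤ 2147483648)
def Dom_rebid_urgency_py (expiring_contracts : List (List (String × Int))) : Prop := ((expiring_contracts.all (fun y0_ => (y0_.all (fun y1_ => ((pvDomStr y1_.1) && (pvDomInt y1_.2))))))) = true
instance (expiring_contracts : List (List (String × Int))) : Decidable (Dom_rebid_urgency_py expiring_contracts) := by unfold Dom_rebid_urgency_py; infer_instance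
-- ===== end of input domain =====

-- B replaces A's per-contract running-max fold by collecting the eligible expiry days
-- and probing the four point windows in descending point order (alternative decomposition).


-- shared primitive for Python's c[k] on an int-valued dict given as a pair list: a dict
-- built from pairs keeps the LAST value of a duplicated key, so lookup is last-match;
-- exact where the key is present (KeyError is excluded by Pre_), default 0 never reached inside Pre_
def pvGetKey (c : List (String × Int)) (k : String) : Int :=
  ((c.reverse.find? (fun p => p.1 == k)).map (·.2)).getD 0

def pvHasKey (c : List (String × Int)) (k : String) : Bool :=
  c.any (fun p => p.1 == k)

-- ===== PORT A =====
def rebid_urgency_py (expiring_contracts : List (List (String × Int))) : Int :=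
  expiring_contracts.foldl
    (fun urgency c =>
      if pvGetKey c "is_reytech" ≠ 0 ∨ pvGetKey c "is_award_gap" ≠ 0 then urgency
      else
        let d := pvGetKey c "days_until_expiry"
        if 61 ≤ d ∧ d ≤ 90 then max urgency 30
        else if 31 ≤ d ∧ d ≤ 60 then max urgency 25
        else if 91 ≤ d ∧ d ≤ 120 then max urgency 15
        else if 0 ≤ d ∧ d ≤ 30 then max urgency 10
        else urgency)
    0

-- ===== PORT B =====
def rebid_urgency_py_alt (expiring_contracts : List (List (String × Int))) : Int :=
  let days :=
    (expiring_contracts.filter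
      (fun c => !(pvGetKey c "is_reytech" ≠ 0 ∨ pvGetKey c "is_award_gap" ≠ 0 : Bool))).map
      (fun c => pvGetKey c "days_until_expiry")
  if days.any (fun d => decide (61 ≤ d ∧ d ≤ 90)) then 30
  else if days.any (fun d => decide (31 ≤ d ∧ d ≤ 60)) then 25
  else if days.any (fun d => decide (91 ≤ d ∧ d ≤ 120)) then 15
  else if days.any (fun d => decide (0 ≤ d ∧ d ≤ 30)) then 10
  else 0

-- ===== PRECONDITION & SPEC =====
-- Pre_ excludes exactly the inputs where Python raises KeyError: a contract missing
-- "is_reytech"; one with falsy "is_reytech" missing "is_award_gap" (short-circuited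
-- `or` never reads it otherwise); an eligible contract missing "days_until_expiry".
def Pre_rebid_urgency_py (expiring_contracts : List (List (String × Int))) : Prop :=
  ∀ c ∈ expiring_contracts,
    pvHasKey c "is_reytech" = true ∧
    (pvGetKey c "is_reytech" = 0 → pvHasKey c "is_award_gap" = true) ∧
    (pvGetKey c "is_reytech" = 0 ∧ pvGetKey c "is_award_gap" = 0 →
      pvHasKey c "days_until_expiry" = true)
instance (expiring_contracts : List (List (String × Int))) : Decidable (Pre_rebid_urgency_py expiring_contracts) := by unfold Pre_rebid_urgency_py; infer_instance

def pvWitness_rebid_urgency_py : (List (List (String × Int))) :=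
  [[("is_reytech", 0), ("is_award_gap", 0), ("days_until_expiry", 70)]]

def Spec_rebid_urgency_py (expiring_contracts : List (List (String × Int))) (out : Int) : Prop := out = rebid_urgency_py_alt expiring_contracts
instance (expiring_contracts : List (List (String × Int))) (out : Int) : Decidable (Spec_rebid_urgency_py expiring_contracts out) := by unfold Spec_rebid_urgency_py; infer_instance

-- ===== CLAIM (what is proved, stated in full; the proofs are below) =====
def Claim_equal_rebid_urgency_py : Prop := ∀ (expiring_contracts : List (List (String × Int))), Dom_rebid_urgency_py expiring_contracts → Pre_rebid_urgency_py expiring_contracts → Spec_rebid_urgency_py expiring_contracts (rebid_urgency_py expiring_contracts)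

-- ===== LEMMAS AND PROOFS =====

-- points awarded for one eligible day (A's if-chain, as a value)
def pvPts (d : Int) : Int :=
  if 61 ≤ d ∧ d ≤ 90 then 30
  else if 31 ≤ d ∧ d ≤ 60 then 25
  else if 91 ≤ d ∧ d ≤ 120 then 15
  else if 0 ≤ d ∧ d ≤ 30 then 10
  else 0

-- B's probe on a plain list of days
def pvProbe (days : List Int) : Int :=
  if days.any (fun d => decide (61 ≤ d ∧ d ≤ 90)) then 30
  else if days.any (fun d => decide (31 ≤ d ∧ d ≤ 60)) then 25
  else if days.any (fun d => decide (91 ≤ d ∧ d ≤ 120)) then 15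
  else if days.any (fun d => decide (0 ≤ d ∧ d ≤ 30)) then 10
  else 0

lemma pvProbe_bounds (days : List Int) : 0 ≤ pvProbe days ∧ pvProbe days ≤ 30 := by
  unfold pvProbe; split_ifs <;> omega

set_option maxHeartbeats 2000000 in
lemma pvProbe_cons (d : Int) (ds : List Int) :
    pvProbe (d :: ds) = max (pvPts d) (pvProbe ds) := by
  by_cases h1 : 61 ≤ d ∧ d ≤ 90 <;>
    by_cases h2 : 31 ≤ d ∧ d ≤ 60 <;>
      by_cases h3 : 91 ≤ d ∧ d ≤ 120 <;>
        by_cases h4 : 0 ≤ d ∧ d ≤ 30 <;>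
          simp [pvProbe, pvPts, List.any_cons, h1, h2, h3, h4] <;>
          split_ifs <;> omega

-- A's step function is max with pvPts
lemma step_eq_max (u d : Int) (hu : 0 ≤ u) :
    (if 61 ≤ d ∧ d ≤ 90 then max u 30
     else if 31 ≤ d ∧ d ≤ 60 then max u 25
     else if 91 ≤ d ∧ d ≤ 120 then max u 15
     else if 0 ≤ d ∧ d ≤ 30 then max u 10
     else u) = max u (pvPts d) := by
  unfold pvPts; split_ifs <;> omega

def pvDays (l : List (List (String × Int))) : List Int :=
  (l.filter
    (fun c => !(pvGetKey c "is_reytech" ≠ 0 ∨ pvGetKey c "is_award_gap" ≠ 0 : Bool))).map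
    (fun c => pvGetKey c "days_until_expiry")

lemma alt_eq_probe (l : List (List (String × Int))) :
    rebid_urgency_py_alt l = pvProbe (pvDays l) := rfl

lemma foldA_eq (l : List (List (String × Int))) (u : Int) (hu : 0 ≤ u) :
    l.foldl
      (fun urgency c =>
        if pvGetKey c "is_reytech" ≠ 0 ∨ pvGetKey c "is_award_gap" ≠ 0 then urgency
        else
          let d := pvGetKey c "days_until_expiry"
          if 61 ≤ d ∧ d ≤ 90 then max urgency 30
          else if 31 ≤ d ∧ d ≤ 60 then max urgency 25
          else if 91 ≤ d ∧ d ≤ 120 then max urgency 15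
          else if 0 ≤ d ∧ d ≤ 30 then max urgency 10
          else urgency)
      u = max u (pvProbe (pvDays l)) := by
  induction l generalizing u with
  | nil =>
    simp [pvDays, pvProbe]; omega
  | cons c l ih =>
    by_cases hc : pvGetKey c "is_reytech" ≠ 0 ∨ pvGetKey c "is_award_gap" ≠ 0
    · simp only [List.foldl_cons, if_pos hc]
      rw [ih u hu]
      congr 2
      simp only [pvDays, List.filter_cons]
      rcases hc with h | h <;> simp [h]
    · simp only [List.foldl_cons, if_neg hc]
      rw [step_eq_max _ _ hu]
      have hpts : 0 ≤ pvPts (pvGetKey c "days_until_expiry") := by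
        unfold pvPts; split_ifs <;> omega
      rw [ih _ (by omega)]
      have ha : pvGetKey c "is_reytech" = 0 := by tauto
      have hb : pvGetKey c "is_award_gap" = 0 := by tauto
      have : pvDays (c :: l) = pvGetKey c "days_until_expiry" :: pvDays l := by
        simp [pvDays, ha, hb]
      rw [this, pvProbe_cons]
      omega

-- ===== VERDICT (by name: the statement is the Claim_ definition above) =====
theorem rebid_urgency_py_spec : Claim_equal_rebid_urgency_py := by
  intro l _ _
  unfold Spec_rebid_urgency_py
  rw [alt_eq_probe]
  have h := foldA_eq l 0 le_rfl
  have hb := pvProbe_bounds (pvDays l)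
  unfold rebid_urgency_py
  omega
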